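-- pv_equiv track=rewrite | github.com/duxman/luces | LedMatrixAnimation.py | calculateMatrix
-- ===== SOURCE A (Python) =====
-- def calculateMatrix(MatrixHeight, MatrixWidth):
--     bInc = True
--     myMatrix = []
--     for i in range(MatrixHeight, 0, -1):
--         # Calculate Max and min led
--         maxled = (i * MatrixWidth)
--         minled = (maxled - MatrixWidth)
--         # For calculate go and return
--         if bInc == False:
--             rangeMatrixLine = range(maxled - 1, minled - 1, -1)
--             bInc = True
--         else:
--             rangeMatrixLine = range(minled, maxled, 1)
--             bInc = False;
--         myMatrix.extend(rangeMatrixLine)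
--     return myMatrix
-- ===== SOURCE B (Python) =====
-- def calculateMatrix(MatrixHeight, MatrixWidth):
--     # One flat pass: the k-th LED of the serpentine order is computed in closed
--     # form from k via divmod, no per-row range construction at all.
--     if MatrixHeight > 0 and MatrixWidth > 0:
--         total = MatrixHeight * MatrixWidth
--     else:
--         total = 0
--     return [
--         (MatrixHeight - 1 - k // MatrixWidth) * MatrixWidth
--         + (k % MatrixWidth if (k // MatrixWidth) % 2 == 0
--            else MatrixWidth - 1 - k % MatrixWidth)
--         for k in range(total)
--     ]
-- ===== Notes on version B (the rewrite author's own statement) =====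
-- stated objective: alternative
-- what changed: Replaces A's stateful row-by-row loop (toggled boolean choosing between ascending and descending range objects that are concatenated) by a single flat map over range(H*W) that computes the k-th serpentine index directly in closed form from k via divmod (row = k//W, column = k%W, mirrored on odd rows).
import Mathlib
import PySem

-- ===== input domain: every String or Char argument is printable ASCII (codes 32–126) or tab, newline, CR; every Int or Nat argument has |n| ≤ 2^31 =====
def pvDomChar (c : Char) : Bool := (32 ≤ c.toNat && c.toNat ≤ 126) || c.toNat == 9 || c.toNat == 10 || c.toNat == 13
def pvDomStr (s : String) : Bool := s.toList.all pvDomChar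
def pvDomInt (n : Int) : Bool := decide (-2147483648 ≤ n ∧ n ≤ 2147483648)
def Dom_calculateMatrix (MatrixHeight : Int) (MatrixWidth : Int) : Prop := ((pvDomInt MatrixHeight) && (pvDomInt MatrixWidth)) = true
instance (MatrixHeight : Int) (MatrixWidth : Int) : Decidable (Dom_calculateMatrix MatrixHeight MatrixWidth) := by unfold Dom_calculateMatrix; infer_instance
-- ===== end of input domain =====

-- B replaces A's stateful row loop (toggled boolean extending with range objects) by one
-- flat map over range(H*W) computing the k-th serpentine index in closed form via divmod
-- (alternative decomposition; same cost).

-- ===== PORT A =====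
-- literal transliteration of A: fold over range(MatrixHeight, 0, -1) with state (bInc, myMatrix)
def calculateMatrix (MatrixHeight : Int) (MatrixWidth : Int) : List Int :=
  let st := (PySem.List.pyRange MatrixHeight 0 (-1)).foldl
    (fun (st : Bool × List Int) i =>
      let maxled := i * MatrixWidth
      let minled := maxled - MatrixWidth
      if st.1 = false then
        (true, st.2 ++ PySem.List.pyRange (maxled - 1) (minled - 1) (-1))
      else
        (false, st.2 ++ PySem.List.pyRange minled maxled 1))
    (true, [])
  st.2

-- ===== PORT B =====
-- literal transliteration of B: a comprehension over range(total) computing each index via divmod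
def calculateMatrix_alt (MatrixHeight : Int) (MatrixWidth : Int) : List Int :=
  let total := if MatrixHeight > 0 ∧ MatrixWidth > 0 then MatrixHeight * MatrixWidth else 0
  (PySem.List.pyRange 0 total 1).map (fun k =>
    (MatrixHeight - 1 - PySem.Int.floordiv k MatrixWidth) * MatrixWidth +
    (if PySem.Int.mod (PySem.Int.floordiv k MatrixWidth) 2 = 0 then PySem.Int.mod k MatrixWidth
     else MatrixWidth - 1 - PySem.Int.mod k MatrixWidth))

-- ===== PRECONDITION & SPEC =====
def Spec_calculateMatrix (MatrixHeight : Int) (MatrixWidth : Int) (out : List Int) : Prop := out = calculateMatrix_alt MatrixHeight MatrixWidth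
instance (MatrixHeight : Int) (MatrixWidth : Int) (out : List Int) : Decidable (Spec_calculateMatrix MatrixHeight MatrixWidth out) := by unfold Spec_calculateMatrix; infer_instance

-- ===== CLAIM (what is proved, stated in full; the proofs are below) =====
def Claim_equal_calculateMatrix : Prop := ∀ (MatrixHeight : Int) (MatrixWidth : Int), Dom_calculateMatrix MatrixHeight MatrixWidth → Spec_calculateMatrix MatrixHeight MatrixWidth (calculateMatrix MatrixHeight MatrixWidth)

-- ===== LEMMAS AND PROOFS =====

-- the serpentine row for row index k (0 = top row)
def pvRow (H W : Int) (k : Nat) : List Int :=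
  let base := (H - 1 - (k : Int)) * W
  if k % 2 = 0 then (PySem.List.pyRange 0 W 1).map (fun c => base + c)
  else (PySem.List.pyRange 0 W 1).map (fun c => base + (W - 1 - c))

def pvRows (H W : Int) (n : Nat) : List Int :=
  (List.range n).flatMap (pvRow H W)

-- A's loop body
def pvStepA (W : Int) (st : Bool × List Int) (i : Int) : Bool × List Int :=
  let maxled := i * W
  let minled := maxled - W
  if st.1 = false then
    (true, st.2 ++ PySem.List.pyRange (maxled - 1) (minled - 1) (-1))
  else
    (false, st.2 ++ PySem.List.pyRange minled maxled 1)

lemma pvRows_succ (H W : Int) (n : Nat) :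
    pvRows H W (n + 1) = pvRows H W n ++ pvRow H W n := by
  simp [pvRows, List.range_succ]

-- A's ascending row equals the even serpentine row
lemma pvRow_even (H W : Int) (k : Nat) (hk : k % 2 = 0) :
    PySem.List.pyRange ((H - (k:Int)) * W - W) ((H - (k:Int)) * W) 1 = pvRow H W k := by
  simp only [pvRow]
  rw [if_pos hk, PySem.List.pyRange_one, PySem.List.pyRange_one]
  have h1 : (H - (k:Int)) * W - ((H - (k:Int)) * W - W) = W := by ring
  have h2 : W - (0:Int) = W := by ring
  rw [h1, h2, List.map_map]
  apply List.map_congr_left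
  intro x _
  simp; ring

-- A's descending row equals the odd serpentine row
lemma pvRow_odd (H W : Int) (k : Nat) (hk : k % 2 = 1) :
    PySem.List.pyRange ((H - (k:Int)) * W - 1) ((H - (k:Int)) * W - W - 1) (-1) = pvRow H W k := by
  simp only [pvRow]
  rw [if_neg (by omega), PySem.List.pyRange_neg_one, PySem.List.pyRange_one]
  have h1 : (H - (k:Int)) * W - 1 - ((H - (k:Int)) * W - W - 1) = W := by ring
  have h2 : W - (0:Int) = W := by ring
  rw [h1, h2, List.map_map]
  apply List.map_congr_left
  intro x _
  simp; ring

-- invariant for A's fold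
lemma pvA_inv (H W : Int) (n : Nat) :
    ((List.range n).map (fun (k : Nat) => H - (k : Int))).foldl (pvStepA W) (true, []) =
      (decide (n % 2 = 0), pvRows H W n) := by
  induction n with
  | zero => simp [pvRows]
  | succ n ih =>
    rw [List.range_succ, List.map_append, List.foldl_append, ih]
    simp only [List.map_cons, List.map_nil, List.foldl_cons, List.foldl_nil]
    rw [pvRows_succ]
    rcases Nat.even_or_odd n with he | ho
    · have h0 : n % 2 = 0 := Nat.even_iff.mp he
      have h1 : (n + 1) % 2 = 1 := by omega
      have hb : (decide (n % 2 = 0)) = true := by simp [h0]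
      have hb' : (decide ((n + 1) % 2 = 0)) = false := by simp [h1]
      simp only [pvStepA, hb, hb']
      rw [if_neg (by simp)]
      rw [pvRow_even H W n h0]
    · have h0 : n % 2 = 1 := Nat.odd_iff.mp ho
      have h1 : (n + 1) % 2 = 0 := by omega
      have hb : (decide (n % 2 = 0)) = false := by simp [h0]
      have hb' : (decide ((n + 1) % 2 = 0)) = true := by simp [h1]
      simp only [pvStepA, hb, hb']
      rw [if_pos trivial]
      rw [pvRow_odd H W n h0]

lemma pvA_eq (H W : Int) : calculateMatrix H W = pvRows H W (H.toNat) := by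
  have key : calculateMatrix H W =
      ((PySem.List.pyRange H 0 (-1)).foldl (pvStepA W) (true, [])).2 := rfl
  rw [key, PySem.List.pyRange_neg_one,
    show ((H : Int) - 0).toNat = H.toNat by omega, pvA_inv]

-- B's cell formula
def pvCell (H W k : Int) : Int :=
  (H - 1 - PySem.Int.floordiv k W) * W +
  (if PySem.Int.mod (PySem.Int.floordiv k W) 2 = 0 then PySem.Int.mod k W
   else W - 1 - PySem.Int.mod k W)

-- Python's n % 2 on a nonnegative n is the Nat remainder
lemma pvMod_cast (k : Nat) : PySem.Int.mod (k : Int) 2 = ((k % 2 : Nat) : Int) := by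
  have h : ((k : Int)).fmod 2 = (k : Int) % 2 := by
    rw [Int.fmod_eq_emod]; simp
  simp only [PySem.Int.mod, h]
  omega

-- for c < w, divmod of c + n*w by w is (n, c)
lemma pvDivMod (n c w : Nat) (hw : 0 < w) (hc : c < w) :
    PySem.Int.floordiv ((c + n * w : Nat) : Int) ((w : Nat) : Int) = (n : Int) ∧
    PySem.Int.mod ((c + n * w : Nat) : Int) ((w : Nat) : Int) = (c : Int) := by
  constructor
  · rw [PySem.Int.floordiv_natCast]
    have : (c + n * w) / w = n := by
      rw [Nat.add_mul_div_right _ _ hw, Nat.div_eq_of_lt hc]; omega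
    rw [this]
  · rw [PySem.Int.mod_natCast]
    have : (c + n * w) % w = c := by
      rw [Nat.add_mul_mod_self_right, Nat.mod_eq_of_lt hc]
    rw [this]

-- block n of B's flat map is the serpentine row n
lemma pvBlock (H W : Int) (n w : Nat) (hW : W = (w : Int)) (hw : 0 < w) :
    (List.range w).map (fun c => pvCell H W ((n * w + c : Nat) : Int)) = pvRow H W n := by
  subst hW
  simp only [pvRow, PySem.List.pyRange_one]
  have hwn : ((w : Int) - 0).toNat = w := by omega
  rw [hwn]
  rcases Nat.even_or_odd n with he | ho
  · have h0 : n % 2 = 0 := Nat.even_iff.mp he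
    rw [if_pos h0, List.map_map]
    apply List.map_congr_left
    intro c hc
    have hc' : c < w := List.mem_range.mp hc
    have hd := pvDivMod n c w hw hc'
    have harg : ((n * w + c : Nat) : Int) = ((c + n * w : Nat) : Int) := by push_cast; ring
    simp only [Function.comp, pvCell, harg, hd.1, hd.2]
    rw [if_pos (by rw [pvMod_cast, h0]; rfl)]
    ring
  · have h0 : n % 2 = 1 := Nat.odd_iff.mp ho
    rw [if_neg (by omega), List.map_map]
    apply List.map_congr_left
    intro c hc
    have hc' : c < w := List.mem_range.mp hc
    have hd := pvDivMod n c w hw hc'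
    have harg : ((n * w + c : Nat) : Int) = ((c + n * w : Nat) : Int) := by push_cast; ring
    simp only [Function.comp, pvCell, harg, hd.1, hd.2]
    rw [if_neg (by rw [pvMod_cast, h0]; simp)]
    ring

lemma pvB_blocks (H W : Int) (w : Nat) (hW : W = (w : Int)) (hw : 0 < w) (n : Nat) :
    (List.range (n * w)).map (fun (k : Nat) => pvCell H W (k : Int)) = pvRows H W n := by
  induction n with
  | zero => simp [pvRows]
  | succ n ih =>
    have hsplit : (n + 1) * w = n * w + w := by ring
    rw [hsplit, List.range_add, List.map_append, ih, pvRows_succ, List.map_map]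
    congr 1
    rw [← pvBlock H W n w hW hw]
    apply List.map_congr_left
    intro c _
    rfl

lemma pvB_eq (H W : Int) : calculateMatrix_alt H W = pvRows H W (H.toNat) := by
  by_cases h : H > 0 ∧ W > 0
  · simp only [calculateMatrix_alt]
    rw [if_pos h, PySem.List.pyRange_one]
    have hHW : ((H * W : Int) - 0).toNat = H.toNat * W.toNat := by
      rcases h with ⟨h1, h2⟩
      have : H * W = ((H.toNat * W.toNat : Nat) : Int) := by push_cast; rw [Int.toNat_of_nonneg (le_of_lt h1), Int.toNat_of_nonneg (le_of_lt h2)]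
      omega
    rw [hHW]
    have hW : W = ((W.toNat : Nat) : Int) := by omega
    have := pvB_blocks H W W.toNat hW (by omega) H.toNat
    rw [← this, List.map_map]
    apply List.map_congr_left
    intro k _
    simp only [Function.comp, pvCell, zero_add]
  · simp only [calculateMatrix_alt]
    rw [if_neg h, PySem.List.pyRange_one_eq_nil (le_refl 0), List.map_nil]
    have : pvRows H W H.toNat = [] := by
      rcases not_and_or.mp h with h1 | h1
      · have : H.toNat = 0 := by omega
        simp [pvRows, this]
      · simp only [pvRows, List.flatMap_eq_nil_iff]
        intro k _
        have hrw : PySem.List.pyRange 0 W 1 = [] := PySem.List.pyRange_one_eq_nil (by omega)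
        simp [pvRow, hrw]
    rw [this]

theorem pv_final (H W : Int) : calculateMatrix H W = calculateMatrix_alt H W := by
  rw [pvA_eq, pvB_eq]

-- ===== VERDICT (by name: the statement is the Claim_ definition above) =====
theorem calculateMatrix_spec : Claim_equal_calculateMatrix := by
  intro H W _
  show calculateMatrix H W = calculateMatrix_alt H W
  exact pv_final H W
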